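-- pv_equiv track=rewrite | github.com/pan-dya/Semester4Exercises | Compilation Techniques/quiz1.py | is_valid_fmt
-- ===== SOURCE A (Python) =====
-- def is_valid_fmt(input_str):
--     states = {0, 1, 2, 3, 4}
--     accepting_states = {1}
--     transitions = {
--         0: {'%': 2},
--         2: {'0': 3, '1': 3, '2': 3, '3': 3, '4': 3, '5': 3, '6': 3, '7': 3, '8': 3, '9': 3},
--         3: {'0': 3, '1': 3, '2': 3, '3': 3, '4': 3, '5': 3, '6': 3, '7': 3, '8': 3, '9': 3, '.': 4, 'd': 1, 'c': 1, 'f': 1, 's': 1},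
--         4: {'0': 3, '1': 3, '2': 3, '3': 3, '4': 3, '5': 3, '6': 3, '7': 3, '8': 3, '9': 3},
--         1: {}
--     }
--
--     current_state = 0
--     for char in input_str:
--         if current_state in states and char in transitions[current_state]:
--             current_state = transitions[current_state][char]
--         else:
--             return False
--
--     return current_state in accepting_states
-- ===== SOURCE B (Python) =====
-- def is_valid_fmt(input_str):
--     # direct structured scanner for %[0-9]+(\.[0-9]+)*[dcfs]
--     if not input_str or input_str[0] != '%':
--         return False
--     i = 1
--     n = len(input_str)
--     while True:
--         j = i
--         while j < n and '0' <= input_str[j] <= '9':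
--             j += 1
--         if j == i:
--             return False
--         i = j
--         if i < n and input_str[i] == '.':
--             i += 1
--         else:
--             break
--     return i == n - 1 and input_str[i] in 'dcfs'
-- ===== Notes on version B (the rewrite author's own statement) =====
-- stated objective: idiomatic
-- what changed: Replaced the generic transition-table DFA with a direct structured scanner that parses the shape %digits('.'digits)* followed by a final conversion character in {d,c,f,s}.
import Mathlib
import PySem

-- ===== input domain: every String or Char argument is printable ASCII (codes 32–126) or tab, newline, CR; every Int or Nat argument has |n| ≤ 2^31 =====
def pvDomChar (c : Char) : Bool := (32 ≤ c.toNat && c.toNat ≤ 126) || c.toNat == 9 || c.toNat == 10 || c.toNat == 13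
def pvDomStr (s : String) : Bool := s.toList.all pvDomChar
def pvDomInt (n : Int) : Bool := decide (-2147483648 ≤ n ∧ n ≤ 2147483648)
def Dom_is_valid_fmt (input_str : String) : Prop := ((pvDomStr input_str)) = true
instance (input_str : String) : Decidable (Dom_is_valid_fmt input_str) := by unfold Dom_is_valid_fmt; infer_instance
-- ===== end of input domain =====

-- B replaces A's transition-table DFA with a direct structured scanner of the shape %digits('.'digits)*[dcfs] (idiomatic; same cost).

-- ===== PORT A =====
-- transitions[st].get(char): the literal dict of A, written as a function; 'current_state in states'
-- is kept as the explicit membership test A performs. Returning none = the 'else: return False' branch.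
def transA (st : Int) (c : Char) : Option Int :=
  if st = 0 then (if c = '%' then some 2 else none)
  else if st = 2 then
    (if c = '0' ∨ c = '1' ∨ c = '2' ∨ c = '3' ∨ c = '4' ∨ c = '5' ∨ c = '6' ∨ c = '7' ∨ c = '8' ∨ c = '9'
     then some 3 else none)
  else if st = 3 then
    (if c = '0' ∨ c = '1' ∨ c = '2' ∨ c = '3' ∨ c = '4' ∨ c = '5' ∨ c = '6' ∨ c = '7' ∨ c = '8' ∨ c = '9'
     then some 3
     else if c = '.' then some 4
     else if c = 'd' ∨ c = 'c' ∨ c = 'f' ∨ c = 's' then some 1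
     else none)
  else if st = 4 then
    (if c = '0' ∨ c = '1' ∨ c = '2' ∨ c = '3' ∨ c = '4' ∨ c = '5' ∨ c = '6' ∨ c = '7' ∨ c = '8' ∨ c = '9'
     then some 3 else none)
  else none  -- st = 1: empty dict (also covers the unreachable 'st not in states')

-- the for-loop with early 'return False'
def loopA (st : Int) : List Char → Bool
  | [] => st == 1      -- 'current_state in accepting_states'
  | c :: rest =>
    if (st = 0 ∨ st = 1 ∨ st = 2 ∨ st = 3 ∨ st = 4) then
      match transA st c with
      | some st' => loopA st' rest
      | none => false
    else false

def is_valid_fmt (input_str : String) : Bool := loopA 0 input_str.toList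

-- ===== PORT B =====
-- scanner: 'tailB' is the inner digit loop + dispatch after at least one digit was seen;
-- 'groupB' demands one-or-more digits then continues with tailB.
mutual
def groupB : List Char → Bool
  | [] => false
  | c :: rest => if '0' ≤ c ∧ c ≤ '9' then tailB rest else false

def tailB : List Char → Bool
  | [] => false
  | c :: rest =>
    if '0' ≤ c ∧ c ≤ '9' then tailB rest
    else if c = '.' then groupB rest
    else (c = 'd' ∨ c = 'c' ∨ c = 'f' ∨ c = 's') && rest = []
end

def is_valid_fmt_alt (input_str : String) : Bool :=
  match input_str.toList with
  | '%' :: rest => groupB rest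
  | _ => false

-- ===== PRECONDITION & SPEC =====
def Spec_is_valid_fmt (input_str : String) (out : Bool) : Prop := out = is_valid_fmt_alt input_str
instance (input_str : String) (out : Bool) : Decidable (Spec_is_valid_fmt input_str out) := by unfold Spec_is_valid_fmt; infer_instance

-- ===== CLAIM (what is proved, stated in full; the proofs are below) =====
def Claim_equal_is_valid_fmt : Prop := ∀ (input_str : String), Dom_is_valid_fmt input_str → Spec_is_valid_fmt input_str (is_valid_fmt input_str)

-- ===== LEMMAS AND PROOFS =====

-- A's enumerated digit keys coincide with B's range test
lemma dig_iff (c : Char) :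
    (c = '0' ∨ c = '1' ∨ c = '2' ∨ c = '3' ∨ c = '4' ∨ c = '5' ∨ c = '6' ∨ c = '7' ∨ c = '8' ∨ c = '9')
    ↔ ('0' ≤ c ∧ c ≤ '9') := by
  constructor
  · rintro (rfl|rfl|rfl|rfl|rfl|rfl|rfl|rfl|rfl|rfl) <;> exact ⟨by decide, by decide⟩
  · rintro ⟨h1, h2⟩
    rw [Char.le_def, UInt32.le_iff_toNat_le] at h1 h2
    have e0 : ('0':Char).val.toNat = 48 := by decide
    have e9 : ('9':Char).val.toNat = 57 := by decide
    rw [e0] at h1; rw [e9] at h2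
    have hv : c.val.toNat = 48 ∨ c.val.toNat = 49 ∨ c.val.toNat = 50 ∨ c.val.toNat = 51 ∨
        c.val.toNat = 52 ∨ c.val.toNat = 53 ∨ c.val.toNat = 54 ∨ c.val.toNat = 55 ∨
        c.val.toNat = 56 ∨ c.val.toNat = 57 := by omega
    have hc : ∀ d : Char, c.val.toNat = d.val.toNat → c = d := by
      intro d h
      apply Char.ext
      exact UInt32.toNat_inj.mp h
    rcases hv with h|h|h|h|h|h|h|h|h|h
    · exact Or.inl (hc '0' h)
    · exact Or.inr (Or.inl (hc '1' h))
    · exact Or.inr (Or.inr (Or.inl (hc '2' h)))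
    · exact Or.inr (Or.inr (Or.inr (Or.inl (hc '3' h))))
    · exact Or.inr (Or.inr (Or.inr (Or.inr (Or.inl (hc '4' h)))))
    · exact Or.inr (Or.inr (Or.inr (Or.inr (Or.inr (Or.inl (hc '5' h))))))
    · exact Or.inr (Or.inr (Or.inr (Or.inr (Or.inr (Or.inr (Or.inl (hc '6' h)))))))
    · exact Or.inr (Or.inr (Or.inr (Or.inr (Or.inr (Or.inr (Or.inr (Or.inl (hc '7' h))))))))
    · exact Or.inr (Or.inr (Or.inr (Or.inr (Or.inr (Or.inr (Or.inr (Or.inr (Or.inl (hc '8' h)))))))))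
    · exact Or.inr (Or.inr (Or.inr (Or.inr (Or.inr (Or.inr (Or.inr (Or.inr (Or.inr (hc '9' h)))))))))

-- state 1 accepts exactly the empty remainder
lemma loopA_one (l : List Char) : loopA 1 l = decide (l = []) := by
  cases l with
  | nil => simp [loopA]
  | cons c rest => simp [loopA, transA]

-- the joint invariant: state 2 and state 4 behave like groupB, state 3 like tailB
lemma loopA_states (l : List Char) :
    loopA 2 l = groupB l ∧ loopA 3 l = tailB l ∧ loopA 4 l = groupB l := by
  induction l with
  | nil => refine ⟨?_, ?_, ?_⟩ <;> simp [loopA, groupB, tailB]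
  | cons c rest ih =>
    obtain ⟨ih2, ih3, ih4⟩ := ih
    refine ⟨?_, ?_, ?_⟩
    · by_cases hd : '0' ≤ c ∧ c ≤ '9'
      · have := (dig_iff c).mpr hd
        simp [loopA, transA, groupB, this, hd, ih3]
      · have : ¬(c = '0' ∨ c = '1' ∨ c = '2' ∨ c = '3' ∨ c = '4' ∨ c = '5' ∨ c = '6' ∨ c = '7' ∨ c = '8' ∨ c = '9') :=
          fun h => hd ((dig_iff c).mp h)
        simp [loopA, transA, groupB, this, hd]
    · by_cases hd : '0' ≤ c ∧ c ≤ '9'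
      · have := (dig_iff c).mpr hd
        simp [loopA, transA, tailB, this, hd, ih3]
      · have hnd : ¬(c = '0' ∨ c = '1' ∨ c = '2' ∨ c = '3' ∨ c = '4' ∨ c = '5' ∨ c = '6' ∨ c = '7' ∨ c = '8' ∨ c = '9') :=
          fun h => hd ((dig_iff c).mp h)
        by_cases hdot : c = '.'
        · simp [loopA, transA, tailB, hdot, ih4]
        · by_cases hcv : c = 'd' ∨ c = 'c' ∨ c = 'f' ∨ c = 's'
          · simp [loopA, transA, tailB, hnd, hd, hdot, hcv, loopA_one]
          · simp [loopA, transA, tailB, hnd, hd, hdot, hcv]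
    · by_cases hd : '0' ≤ c ∧ c ≤ '9'
      · have := (dig_iff c).mpr hd
        simp [loopA, transA, groupB, this, hd, ih3]
      · have : ¬(c = '0' ∨ c = '1' ∨ c = '2' ∨ c = '3' ∨ c = '4' ∨ c = '5' ∨ c = '6' ∨ c = '7' ∨ c = '8' ∨ c = '9') :=
          fun h => hd ((dig_iff c).mp h)
        simp [loopA, transA, groupB, this, hd]

-- ===== VERDICT (by name: the statement is the Claim_ definition above) =====
theorem is_valid_fmt_spec : Claim_equal_is_valid_fmt := by
  intro s _
  unfold Spec_is_valid_fmt is_valid_fmt is_valid_fmt_alt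
  cases hl : s.toList with
  | nil => simp [loopA]
  | cons c rest =>
    by_cases hc : c = '%'
    · subst hc
      simp [loopA, transA, (loopA_states rest).1]
    · have h2 : loopA 0 (c :: rest) = false := by simp [loopA, transA, hc]
      rw [h2]
      split
      · next heq => simp_all
      · rfl
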